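-- pv_equiv track=rewrite | github.com/joshivikash/firstpythonrepo | week12/ppa10.py | final
-- ===== SOURCE A (Python) =====
-- def final(n, moves):
--     """
--     Compute the final position
--
--     Argument:
--         n: int
--         moves: string
--     Return:
--         (x, y): tuple
--     """
--     mat = [[(i+1,j+1) for j in range(n)] for i in range(n)]
--     i,j=0,0
--     for m in moves:
--         if m == 'N':
--             j = j + 1 if j + 1 < n else j
--         if m == 'E':
--             i = i + 1 if i + 1 < n else i
--         if m == 'W':
--             i = i - 1 if i - 1 > -1 else i
--         if m == 'S':
--             j = j - 1 if j - 1 > -1 else j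
--     return mat[i][j]
-- ===== SOURCE B (Python) =====
-- def final(n, moves):
--     """Final clamped grid position, computed per axis by composing clamp
--     functions: the whole walk on one axis is maintained as the function
--     x -> min(b, max(a, x + c)), updated in O(1) per move, then evaluated at 0.
--     No n*n matrix is built."""
--     def axis(inc, dec):
--         a, b, c = 0, n - 1, 0
--         for m in moves:
--             d = 1 if m == inc else (-1 if m == dec else 0)
--             if d != 0:
--                 c = c + d
--                 a = min(n - 1, max(0, a + d))
--                 b = min(n - 1, max(0, b + d))
--         return min(b, max(a, c))
--     return (axis('E', 'W') + 1, axis('N', 'S') + 1)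
-- ===== Notes on version B (the rewrite author's own statement) =====
-- stated objective: faster
-- what changed: B drops the n*n matrix and the joint (i,j) walk: each axis is handled by an independent pass that composes the per-move clamp maps into a single function min(b, max(a, x+c)) maintained as a triple, then evaluates it at 0.
-- outside the precondition, e.g. on final(0, 'N'): A raises IndexError, B returns (0, 0)
import Mathlib
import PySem

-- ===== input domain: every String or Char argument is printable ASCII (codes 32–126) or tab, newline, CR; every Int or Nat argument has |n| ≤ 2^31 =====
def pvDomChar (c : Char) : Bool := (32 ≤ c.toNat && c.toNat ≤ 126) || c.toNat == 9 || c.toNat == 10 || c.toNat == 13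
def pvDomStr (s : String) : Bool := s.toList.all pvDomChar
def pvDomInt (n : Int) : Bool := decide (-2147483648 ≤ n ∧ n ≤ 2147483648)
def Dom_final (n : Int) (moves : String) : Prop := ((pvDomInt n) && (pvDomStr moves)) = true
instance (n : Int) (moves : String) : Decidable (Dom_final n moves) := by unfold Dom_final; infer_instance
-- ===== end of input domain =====

-- B replaces A's n×n matrix and joint clamped walk by two independent axis passes, each
-- composing the per-move clamp maps into one function min(b, max(a, x+c)): O(m) instead of O(n^2 + m).

-- ===== PORT A =====
-- loop body of A, one step per character (same branch order and same conditional expressions as the Python)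
def finalStepA (n : Int) (ij : Int × Int) (m : Char) : Int × Int :=
  let j1 := if m = 'N' then (if ij.2 + 1 < n then ij.2 + 1 else ij.2) else ij.2
  let i1 := if m = 'E' then (if ij.1 + 1 < n then ij.1 + 1 else ij.1) else ij.1
  let i2 := if m = 'W' then (if i1 - 1 > -1 then i1 - 1 else i1) else i1
  let j2 := if m = 'S' then (if j1 - 1 > -1 then j1 - 1 else j1) else j1
  (i2, j2)

def final (n : Int) (moves : String) : Int × Int :=
  let mat : List (List (Int × Int)) :=
    (PySem.List.pyRange 0 n 1).map (fun i => (PySem.List.pyRange 0 n 1).map (fun j => (i + 1, j + 1)))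
  let p := moves.toList.foldl (finalStepA n) (0, 0)
  -- mat[i][j]: pyGetD is faithful only in range, which Pre_final (1 ≤ n) guarantees
  PySem.List.pyGetD (PySem.List.pyGetD mat p.1 []) p.2 (0, 0)

-- ===== PORT B =====
-- B's inner loop: compose the clamp map of move m onto the triple (a, b, c) representing x ↦ min(b, max(a, x+c))
def finalAxisStep (n : Int) (inc dec : Char) (t : Int × Int × Int) (m : Char) : Int × Int × Int :=
  let d : Int := if m = inc then 1 else if m = dec then -1 else 0
  if d ≠ 0 then (min (n - 1) (max 0 (t.1 + d)), min (n - 1) (max 0 (t.2.1 + d)), t.2.2 + d)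
  else t

-- B's helper 'axis': fold the triple over the moves, then evaluate the composed map at 0
def finalAxis (n : Int) (moves : List Char) (inc dec : Char) : Int :=
  let t := moves.foldl (finalAxisStep n inc dec) (0, n - 1, 0)
  min t.2.1 (max t.1 t.2.2)

def final_alt (n : Int) (moves : String) : Int × Int :=
  (finalAxis n moves.toList 'E' 'W' + 1, finalAxis n moves.toList 'N' 'S' + 1)

-- ===== PRECONDITION & SPEC =====
-- Pre_final excludes n ≤ 0, on which A raises IndexError (mat is empty at the final mat[i][j] lookup).
def Pre_final (n : Int) (moves : String) : Prop := 1 ≤ n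
instance (n : Int) (moves : String) : Decidable (Pre_final n moves) := by unfold Pre_final; infer_instance
def pvWitness_final : Int × String := (3, "NNEESSW")

def Spec_final (n : Int) (moves : String) (out : Int × Int) : Prop := out = final_alt n moves
instance (n : Int) (moves : String) (out : Int × Int) : Decidable (Spec_final n moves out) := by unfold Spec_final; infer_instance

-- ===== CLAIM (what is proved, stated in full; the proofs are below) =====
def Claim_equal_final : Prop := ∀ (n : Int) (moves : String), Dom_final n moves → Pre_final n moves → Spec_final n moves (final n moves)

-- ===== LEMMAS AND PROOFS =====

-- A's one-axis step: what A's joint step does to a single coordinate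
def axisStepA (n : Int) (inc dec : Char) (x : Int) (m : Char) : Int :=
  if m = inc then (if x + 1 < n then x + 1 else x)
  else if m = dec then (if x - 1 > -1 then x - 1 else x)
  else x

-- A's joint step is the product of the two one-axis steps
theorem finalStepA_decomp (n : Int) (ij : Int × Int) (m : Char) :
    finalStepA n ij m = (axisStepA n 'E' 'W' ij.1 m, axisStepA n 'N' 'S' ij.2 m) := by
  simp only [finalStepA, axisStepA]
  split_ifs <;> simp_all

-- hence A's fold is the product of two one-axis folds
theorem foldA_decomp (n : Int) (ms : List Char) : ∀ ij : Int × Int,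
    ms.foldl (finalStepA n) ij =
      (ms.foldl (axisStepA n 'E' 'W') ij.1, ms.foldl (axisStepA n 'N' 'S') ij.2) := by
  induction ms with
  | nil => intro ij; rfl
  | cons m ms ih => intro ij; simp [List.foldl_cons, finalStepA_decomp, ih]

-- how one finalAxisStep acts, by which character was seen
theorem finalAxisStep_inc (n : Int) (inc dec : Char) (_hne : inc ≠ dec) (a b c : Int) :
    finalAxisStep n inc dec (a, b, c) inc
      = (min (n - 1) (max 0 (a + 1)), min (n - 1) (max 0 (b + 1)), c + 1) := by
  simp [finalAxisStep]

theorem finalAxisStep_dec (n : Int) (inc dec : Char) (hne : inc ≠ dec) (a b c : Int) :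
    finalAxisStep n inc dec (a, b, c) dec
      = (min (n - 1) (max 0 (a - 1)), min (n - 1) (max 0 (b - 1)), c - 1) := by
  simp [finalAxisStep, hne.symm]
  omega

theorem finalAxisStep_other (n : Int) (inc dec m : Char) (h1 : m ≠ inc) (h2 : m ≠ dec)
    (a b c : Int) : finalAxisStep n inc dec (a, b, c) m = (a, b, c) := by
  simp [finalAxisStep, h1, h2]

-- one composition step: the updated triple represents axisStepA applied after the old map,
-- and its bounds are preserved (requires inc ≠ dec and 1 ≤ n)
theorem finalAxisStep_represents (n : Int) (inc dec : Char) (hne : inc ≠ dec) (hn : 1 ≤ n)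
    (t : Int × Int × Int) (m : Char)
    (h1 : 0 ≤ t.1) (h2 : t.1 ≤ t.2.1) (h3 : t.2.1 ≤ n - 1) :
    (∀ y : Int, 0 ≤ y → y ≤ n - 1 →
      min (finalAxisStep n inc dec t m).2.1
          (max (finalAxisStep n inc dec t m).1 (y + (finalAxisStep n inc dec t m).2.2))
        = axisStepA n inc dec (min t.2.1 (max t.1 (y + t.2.2))) m) ∧
    0 ≤ (finalAxisStep n inc dec t m).1 ∧
    (finalAxisStep n inc dec t m).1 ≤ (finalAxisStep n inc dec t m).2.1 ∧
    (finalAxisStep n inc dec t m).2.1 ≤ n - 1 := by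
  obtain ⟨a, b, c⟩ := t
  simp only at h1 h2 h3
  by_cases hm1 : m = inc
  · rw [hm1]
    rw [finalAxisStep_inc n inc dec hne a b c]
    refine ⟨fun y hy1 hy2 => ?_, ?_, ?_, ?_⟩
    · show min (min (n - 1) (max 0 (b + 1))) (max (min (n - 1) (max 0 (a + 1))) (y + (c + 1)))
        = axisStepA n inc dec (min b (max a (y + c))) inc
      rw [axisStepA, if_pos rfl]
      split_ifs <;> omega
    · show (0 : Int) ≤ min (n - 1) (max 0 (a + 1)); omega
    · show min (n - 1) (max 0 (a + 1)) ≤ min (n - 1) (max 0 (b + 1)); omega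
    · show min (n - 1) (max 0 (b + 1)) ≤ n - 1; omega
  · by_cases hm2 : m = dec
    · rw [hm2]
      rw [finalAxisStep_dec n inc dec hne a b c]
      refine ⟨fun y hy1 hy2 => ?_, ?_, ?_, ?_⟩
      · show min (min (n - 1) (max 0 (b - 1))) (max (min (n - 1) (max 0 (a - 1))) (y + (c - 1)))
          = axisStepA n inc dec (min b (max a (y + c))) dec
        rw [axisStepA, if_neg (Ne.symm hne), if_pos rfl]
        split_ifs <;> omega
      · show (0 : Int) ≤ min (n - 1) (max 0 (a - 1)); omega
      · show min (n - 1) (max 0 (a - 1)) ≤ min (n - 1) (max 0 (b - 1)); omega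
      · show min (n - 1) (max 0 (b - 1)) ≤ n - 1; omega
    · rw [finalAxisStep_other n inc dec m hm1 hm2 a b c]
      refine ⟨fun y _ _ => ?_, h1, h2, h3⟩
      show min b (max a (y + c)) = axisStepA n inc dec (min b (max a (y + c))) m
      rw [axisStepA, if_neg hm1, if_neg hm2]

-- the full fold: the final triple represents the whole clamped one-axis walk of A
theorem finalAxis_fold (n : Int) (inc dec : Char) (hne : inc ≠ dec) (hn : 1 ≤ n)
    (ms : List Char) : ∀ (t : Int × Int × Int),
    0 ≤ t.1 → t.1 ≤ t.2.1 → t.2.1 ≤ n - 1 →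
    (∀ y : Int, 0 ≤ y → y ≤ n - 1 →
      min (ms.foldl (finalAxisStep n inc dec) t).2.1
          (max (ms.foldl (finalAxisStep n inc dec) t).1
               (y + (ms.foldl (finalAxisStep n inc dec) t).2.2))
        = ms.foldl (axisStepA n inc dec) (min t.2.1 (max t.1 (y + t.2.2)))) ∧
    0 ≤ (ms.foldl (finalAxisStep n inc dec) t).1 ∧
    (ms.foldl (finalAxisStep n inc dec) t).1 ≤ (ms.foldl (finalAxisStep n inc dec) t).2.1 ∧
    (ms.foldl (finalAxisStep n inc dec) t).2.1 ≤ n - 1 := by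
  induction ms with
  | nil => intro t h1 h2 h3; exact ⟨fun y _ _ => rfl, h1, h2, h3⟩
  | cons m ms ih =>
    intro t h1 h2 h3
    obtain ⟨hrep, b1, b2, b3⟩ := finalAxisStep_represents n inc dec hne hn t m h1 h2 h3
    obtain ⟨ihrep, c1, c2, c3⟩ := ih (finalAxisStep n inc dec t m) b1 b2 b3
    refine ⟨fun y hy1 hy2 => ?_, c1, c2, c3⟩
    simp only [List.foldl_cons]
    rw [ihrep y hy1 hy2, hrep y hy1 hy2]

-- B's axis value equals A's one-axis walk from 0, and lies in [0, n-1]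
theorem finalAxis_eq_walk (n : Int) (inc dec : Char) (hne : inc ≠ dec) (hn : 1 ≤ n)
    (ms : List Char) :
    finalAxis n ms inc dec = ms.foldl (axisStepA n inc dec) 0 ∧
    0 ≤ finalAxis n ms inc dec ∧ finalAxis n ms inc dec ≤ n - 1 := by
  obtain ⟨hrep, b1, b2, b3⟩ :=
    finalAxis_fold n inc dec hne hn ms (0, n - 1, 0)
      (by show (0:Int) ≤ 0; omega) (by show (0:Int) ≤ n - 1; omega) (by show n - 1 ≤ n - 1; omega)
  have h0 : min (List.foldl (finalAxisStep n inc dec) (0, n - 1, 0) ms).2.1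
      (max (List.foldl (finalAxisStep n inc dec) (0, n - 1, 0) ms).1
        ((0 : Int) + (List.foldl (finalAxisStep n inc dec) (0, n - 1, 0) ms).2.2))
      = ms.foldl (axisStepA n inc dec) (min (n - 1) (max 0 ((0 : Int) + 0))) :=
    hrep 0 le_rfl (by omega)
  rw [show min (n - 1) (max 0 ((0 : Int) + 0)) = 0 from by omega, zero_add] at h0
  have c1 : 0 ≤ (List.foldl (finalAxisStep n inc dec) (0, n - 1, 0) ms).1 := b1
  have c2 : (List.foldl (finalAxisStep n inc dec) (0, n - 1, 0) ms).1
      ≤ (List.foldl (finalAxisStep n inc dec) (0, n - 1, 0) ms).2.1 := b2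
  have c3 : (List.foldl (finalAxisStep n inc dec) (0, n - 1, 0) ms).2.1 ≤ n - 1 := b3
  refine ⟨h0, ?_, ?_⟩
  · show (0:Int) ≤ min (List.foldl (finalAxisStep n inc dec) (0, n - 1, 0) ms).2.1
      (max (List.foldl (finalAxisStep n inc dec) (0, n - 1, 0) ms).1
        (List.foldl (finalAxisStep n inc dec) (0, n - 1, 0) ms).2.2)
    omega
  · show min (List.foldl (finalAxisStep n inc dec) (0, n - 1, 0) ms).2.1
      (max (List.foldl (finalAxisStep n inc dec) (0, n - 1, 0) ms).1
        (List.foldl (finalAxisStep n inc dec) (0, n - 1, 0) ms).2.2) ≤ n - 1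
    omega

-- ===== VERDICT (by name: the statement is the Claim_ definition above) =====
theorem final_spec : Claim_equal_final := by
  intro n moves _ hn
  have hn' : 1 ≤ n := hn
  unfold Spec_final final final_alt
  obtain ⟨heqI, bI1, bI2⟩ := finalAxis_eq_walk n 'E' 'W' (by decide) hn' moves.toList
  obtain ⟨heqJ, bJ1, bJ2⟩ := finalAxis_eq_walk n 'N' 'S' (by decide) hn' moves.toList
  rw [foldA_decomp, ← heqI, ← heqJ]
  dsimp only
  rw [PySem.List.pyGetD_map_pyRange_of_nonneg _ n _ _ bI1 (by omega),
      PySem.List.pyGetD_map_pyRange_of_nonneg _ n _ _ bJ1 (by omega)]
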